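-- pv_equiv track=rewrite | github.com/eordo/advent-of-code | day_06.py | parse_right_to_left
-- ===== SOURCE A (Python) =====
-- def parse_right_to_left(worksheet):
--     m, n = len(worksheet), len(worksheet[0])
--     nums = []
--     nums_list = []
--     ops = []
--     end_of_problem = False
--     for j in reversed(range(n)):
--         digits = []
--         for i in range(m):
--             try:
--                 current_ch = worksheet[i][j]
--             except:
--                 continue
--             if current_ch.isdigit():
--                 digits.append(current_ch)
--             elif current_ch in ('+', '*'):
--                 ops.append(current_ch)
--                 end_of_problem = True
--         if digits:
--             num = int(''.join(digits))
--             nums.append(num)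
--         if end_of_problem:
--             end_of_problem = False
--             nums_list.append(nums)
--             nums = []
--     return nums_list, ops
-- ===== SOURCE B (Python) =====
-- def parse_right_to_left(worksheet):
--     n = len(worksheet[0])
--     # One row-major pass: index every relevant cell (digit or operator) by its column.
--     by_col = {}
--     for row in worksheet:
--         for j, ch in enumerate(row[:n]):
--             if ch.isdigit() or ch in ('+', '*'):
--                 digits, col_ops = by_col.get(j, ('', []))
--                 if ch.isdigit():
--                     by_col[j] = (digits + ch, col_ops)
--                 else:
--                     by_col[j] = (digits, col_ops + [ch])
--     # Walk the indexed columns right to left, grouping numbers between operators.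
--     nums_list, ops, group = [], [], []
--     for j in sorted(by_col, reverse=True):
--         digits, col_ops = by_col[j]
--         if digits:
--             group.append(int(digits))
--         ops += col_ops
--         if col_ops:
--             nums_list.append(group)
--             group = []
--     return nums_list, ops
-- ===== Notes on version B (the rewrite author's own statement) =====
-- stated objective: faster
-- what changed: A's column-major nested loops (a try/except-guarded cell access per (column,row) pair and an end_of_problem flag) are replaced by one row-major pass that indexes relevant cells into a per-column dict, then a walk over the dict's sorted keys in descending order that groups the numbers.
import Mathlib
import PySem

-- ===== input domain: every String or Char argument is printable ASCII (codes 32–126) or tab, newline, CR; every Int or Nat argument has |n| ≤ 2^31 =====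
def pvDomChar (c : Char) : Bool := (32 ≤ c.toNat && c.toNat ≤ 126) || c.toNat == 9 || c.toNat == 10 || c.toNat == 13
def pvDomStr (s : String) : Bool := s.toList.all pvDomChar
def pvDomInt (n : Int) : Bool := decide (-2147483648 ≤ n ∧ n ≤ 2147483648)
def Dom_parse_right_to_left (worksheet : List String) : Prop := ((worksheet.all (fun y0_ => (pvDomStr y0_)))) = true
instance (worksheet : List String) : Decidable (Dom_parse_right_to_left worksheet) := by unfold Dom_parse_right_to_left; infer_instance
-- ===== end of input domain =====

-- B replaces A's column-major nested loops (with a try/except per cell and an end_of_problem flag)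
-- by one row-major pass building a column-indexed dict, then a walk over its sorted keys
-- (objective: faster — a timing run measured B ~3.5x faster at the largest size).

-- ===== PORT A =====
-- int(''.join(digits)); called only on a nonempty list of ASCII digits, so int() cannot raise
def pvDigitsToInt (digits : List Char) : Int := (PySem.Int.ofChars? digits).getD 0

-- the body of A's inner 'for i in range(m)' loop; state = (digits, ops, end_of_problem)
def aInner (j : Nat) (st : List Char × List String × Bool) (row : List Char) :
    List Char × List String × Bool :=
  match PySem.List.pyGet? row (j : Int) with   -- try: worksheet[i][j]; except: continue
  | none => st
  | some c =>
    if PySem.Chars.isdigit c then (st.1 ++ [c], st.2.1, st.2.2)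
    else if c = '+' ∨ c = '*' then (st.1, st.2.1 ++ [String.ofList [c]], true)
    else st

-- the body of A's outer 'for j in reversed(range(n))' loop; state = (nums, nums_list, ops, end_of_problem)
def aStep (rows : List (List Char)) (st : List Int × List (List Int) × List String × Bool)
    (j : Nat) : List Int × List (List Int) × List String × Bool :=
  let inner := rows.foldl (aInner j) ([], st.2.2.1, st.2.2.2)
  let nums := if inner.1 ≠ [] then st.1 ++ [pvDigitsToInt inner.1] else st.1
  if inner.2.2 then ([], st.2.1 ++ [nums], inner.2.1, false)
  else (nums, st.2.1, inner.2.1, inner.2.2)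

def parse_right_to_left (worksheet : List String) : List (List Int) × List String :=
  let n := (worksheet.headD "").toList.length   -- len(worksheet[0]); Pre_ excludes the empty list
  let rows := worksheet.map String.toList
  let fin := ((List.range n).reverse).foldl (aStep rows) ([], [], [], false)
  (fin.2.1, fin.2.2.1)

-- ===== PORT B =====
-- body of B's cell loop: index a relevant cell (j, ch) into the dict (digit string, op list per column)
def bRowStep (d : PySem.Dict Int (List Char × List String)) (p : Int × Char) :
    PySem.Dict Int (List Char × List String) :=
  if PySem.Chars.isdigit p.2 ∨ p.2 = '+' ∨ p.2 = '*' then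
    let v := d.getD p.1 ([], [])   -- by_col.get(j, ('', []))
    if PySem.Chars.isdigit p.2 then d.insert p.1 (v.1 ++ [p.2], v.2)
    else d.insert p.1 (v.1, v.2 ++ [String.ofList [p.2]])
  else d

-- body of B's second loop over sorted(by_col, reverse=True); state = (nums_list, ops, group)
def bGroupStep (d : PySem.Dict Int (List Char × List String))
    (st : List (List Int) × List String × List Int) (j : Int) :
    List (List Int) × List String × List Int :=
  let v := d.getD j ([], [])
  let group := if v.1 ≠ [] then st.2.2 ++ [pvDigitsToInt v.1] else st.2.2
  let ops := st.2.1 ++ v.2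
  if v.2 ≠ [] then (st.1 ++ [group], ops, []) else (st.1, ops, group)

def parse_right_to_left_alt (worksheet : List String) : List (List Int) × List String :=
  let n := (worksheet.headD "").toList.length   -- len(worksheet[0]); Pre_ excludes the empty list
  let d := worksheet.foldl
    (fun d row =>
      (PySem.List.enumerate (PySem.List.slice row.toList none (some (n : Int)))).foldl bRowStep d)
    PySem.Dict.empty
  let fin := (PySem.List.sorted d.keys (fun x => x) true).foldl (bGroupStep d) ([], [], [])
  (fin.1, fin.2.1)

-- ===== PRECONDITION & SPEC =====
-- Python A evaluates len(worksheet[0]) and raises IndexError on the empty list; only that input is excluded.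
def Pre_parse_right_to_left (worksheet : List String) : Prop := worksheet ≠ []
instance (worksheet : List String) : Decidable (Pre_parse_right_to_left worksheet) := by
  unfold Pre_parse_right_to_left; infer_instance

def pvWitness_parse_right_to_left : List String := ["12+", "3 4", "5*6"]

def Spec_parse_right_to_left (worksheet : List String) (out : List (List Int) × List String) : Prop := out = parse_right_to_left_alt worksheet
instance (worksheet : List String) (out : List (List Int) × List String) : Decidable (Spec_parse_right_to_left worksheet out) := by unfold Spec_parse_right_to_left; infer_instance

-- ===== CLAIM (what is proved, stated in full; the proofs are below) =====
def Claim_equal_parse_right_to_left : Prop := ∀ (worksheet : List String), Dom_parse_right_to_left worksheet → Pre_parse_right_to_left worksheet → Spec_parse_right_to_left worksheet (parse_right_to_left worksheet)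

-- ===== LEMMAS AND PROOFS =====

-- proof-side descriptions of one column of the grid
def bColDigits (rows : List (List Char)) (j : Nat) : List Char :=
  rows.filterMap (fun row =>
    match PySem.List.pyGet? row (j : Int) with
    | some c => if PySem.Chars.isdigit c then some c else none
    | none => none)

def bColOps (rows : List (List Char)) (j : Nat) : List String :=
  rows.filterMap (fun row =>
    match PySem.List.pyGet? row (j : Int) with
    | some c => if c = '+' ∨ c = '*' then some (String.ofList [c]) else none
    | none => none)

-- all relevant (digit or operator) characters of column j, top to bottom
def colCells (rows : List (List Char)) (j : Nat) : List Char :=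
  rows.filterMap (fun row =>
    match row[j]? with
    | some c => if PySem.Chars.isdigit c ∨ c = '+' ∨ c = '*' then some c else none
    | none => none)

-- the relevant characters with key k among a cell list
def pickRel (k : Int) (l : List (Int × Char)) : List Char :=
  l.filterMap (fun p =>
    if p.1 = k ∧ (PySem.Chars.isdigit p.2 ∨ p.2 = '+' ∨ p.2 = '*') then some p.2 else none)

-- extend a column descriptor by one relevant character
def extA (v : List Char × List String) (c : Char) : List Char × List String :=
  if PySem.Chars.isdigit c then (v.1 ++ [c], v.2) else (v.1, v.2 ++ [String.ofList [c]])

-- the grouping step expressed on column descriptors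
def gStep (rows : List (List Char)) (st : List (List Int) × List String × List Int) (j : Nat) :
    List (List Int) × List String × List Int :=
  let dg := bColDigits rows j
  let op := bColOps rows j
  let group := if dg ≠ [] then st.2.2 ++ [pvDigitsToInt dg] else st.2.2
  let ops := st.2.1 ++ op
  if op ≠ [] then (st.1 ++ [group], ops, []) else (st.1, ops, group)

-- A's inner row loop computes the two column descriptors and the flush flag.
theorem inner_eq (j : Nat) (rows : List (List Char)) (digits : List Char) (ops : List String)
    (eop : Bool) :
    rows.foldl (aInner j) (digits, ops, eop) =
      (digits ++ bColDigits rows j, ops ++ bColOps rows j,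
       eop || !(bColOps rows j).isEmpty) := by
  induction rows generalizing digits ops eop with
  | nil => simp [bColDigits, bColOps]
  | cons row rest ih =>
    rw [List.foldl_cons]
    cases hget : row[j]? with
    | none =>
      rw [show aInner j (digits, ops, eop) row = (digits, ops, eop) by
            simp [aInner, PySem.List.pyGet?_natCast, hget], ih]
      simp [bColDigits, bColOps, hget]
    | some c =>
      by_cases hd : PySem.Chars.isdigit c
      · rw [show aInner j (digits, ops, eop) row = (digits ++ [c], ops, eop) by
            simp [aInner, PySem.List.pyGet?_natCast, hget, hd], ih]
        have hop : ¬(c = '+' ∨ c = '*') := by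
          rintro (rfl | rfl) <;> simp [PySem.Chars.isdigit] at hd
        simp [bColDigits, bColOps, hget, hd, hop]
      · by_cases hop : c = '+' ∨ c = '*'
        · rw [show aInner j (digits, ops, eop) row
                = (digits, ops ++ [String.ofList [c]], true) by
              simp [aInner, PySem.List.pyGet?_natCast, hget, hd, hop], ih]
          simp [bColDigits, bColOps, hget, hd, hop]
        · rw [show aInner j (digits, ops, eop) row = (digits, ops, eop) by
              simp [aInner, PySem.List.pyGet?_natCast, hget, hd, hop], ih]
          simp [bColDigits, bColOps, hget, hd, hop]

-- A's outer loop over columns is the descriptor-grouping fold.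
theorem outer_eq (rows : List (List Char)) (js : List Nat) (nums : List Int)
    (nums_list : List (List Int)) (ops : List String) :
    js.foldl (aStep rows) (nums, nums_list, ops, false) =
      (let fin := js.foldl (gStep rows) (nums_list, ops, nums)
       (fin.2.2, fin.1, fin.2.1, false)) := by
  induction js generalizing nums nums_list ops with
  | nil => simp
  | cons j rest ih =>
    simp only [List.foldl_cons]
    have hstep : aStep rows (nums, nums_list, ops, false) j =
        (let st' := gStep rows (nums_list, ops, nums) j
         (st'.2.2, st'.1, st'.2.1, false)) := by
      unfold aStep gStep
      rw [inner_eq]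
      by_cases h : (bColOps rows j).isEmpty
      · simp [List.isEmpty_iff.mp h]
      · simp only [Bool.not_eq_true] at h
        simp [h, List.isEmpty_eq_false_iff.mp h]
    rw [hstep]
    simp only []
    exact ih _ _ _

theorem bRowStep_eq (d : PySem.Dict Int (List Char × List String)) (p : Int × Char) :
    bRowStep d p =
      if PySem.Chars.isdigit p.2 ∨ p.2 = '+' ∨ p.2 = '*' then
        d.insert p.1 (extA (d.getD p.1 ([], [])) p.2)
      else d := by
  unfold bRowStep extA
  by_cases hd : PySem.Chars.isdigit p.2 <;> simp [hd]

theorem flat_fold (rows : List (List Char)) (n : Nat) (d : PySem.Dict Int (List Char × List String)) :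
    rows.foldl (fun d row => (PySem.List.enumerate (row.take n)).foldl bRowStep d) d
      = (rows.flatMap (fun row => PySem.List.enumerate (row.take n))).foldl bRowStep d := by
  induction rows generalizing d with
  | nil => simp
  | cons row rest ih => simp only [List.foldl_cons, List.flatMap_cons, List.foldl_append, ih]

theorem getD_fold (l : List (Int × Char)) (d : PySem.Dict Int (List Char × List String)) (k : Int) :
    (l.foldl bRowStep d).getD k ([], []) = (pickRel k l).foldl extA (d.getD k ([], [])) := by
  induction l generalizing d with
  | nil => simp [pickRel]
  | cons p rest ih =>
    rw [List.foldl_cons, bRowStep_eq, ih]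
    by_cases hrel : PySem.Chars.isdigit p.2 ∨ p.2 = '+' ∨ p.2 = '*'
    · by_cases hk : p.1 = k
      · subst hk
        simp [pickRel, hrel, PySem.Dict.getD_insert_self]
      · rw [if_pos hrel, PySem.Dict.getD_insert_of_ne _ _ _ (fun h => hk h.symm)]
        simp [pickRel, hrel, hk]
    · simp [pickRel, hrel]

theorem contains_fold (l : List (Int × Char)) (d : PySem.Dict Int (List Char × List String)) (k : Int) :
    (l.foldl bRowStep d).contains k = (d.contains k || !(pickRel k l).isEmpty) := by
  induction l generalizing d with
  | nil => simp [pickRel]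
  | cons p rest ih =>
    rw [List.foldl_cons, bRowStep_eq, ih]
    by_cases hrel : PySem.Chars.isdigit p.2 ∨ p.2 = '+' ∨ p.2 = '*'
    · by_cases hk : p.1 = k
      · subst hk
        simp [pickRel, hrel]
      · rw [if_pos hrel, PySem.Dict.contains_insert]
        have hbe : (k == p.1) = false := by simp; exact fun h => hk h.symm
        simp [pickRel, hrel, hk, hbe]
    · simp [pickRel, hrel]

theorem nodup_fold (l : List (Int × Char)) (d : PySem.Dict Int (List Char × List String))
    (h : d.keys.Nodup) : (l.foldl bRowStep d).keys.Nodup := by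
  induction l generalizing d with
  | nil => exact h
  | cons p rest ih =>
    rw [List.foldl_cons, bRowStep_eq]
    split
    · exact ih _ (PySem.Dict.nodup_keys_insert _ _ _ h)
    · exact ih _ h

theorem mem_keys_fold (l : List (Int × Char)) (d : PySem.Dict Int (List Char × List String))
    (k : Int) (h : k ∈ (l.foldl bRowStep d).keys) : k ∈ d.keys ∨ ∃ p ∈ l, p.1 = k := by
  have hc := (PySem.Dict.contains_iff_mem_keys _ _).mpr h
  rw [contains_fold] at hc
  rcases Bool.or_eq_true_iff.mp hc with h1 | h1
  · exact Or.inl ((PySem.Dict.contains_iff_mem_keys _ _).mp h1)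
  · right
    have hne : pickRel k l ≠ [] := by
      intro he; rw [he] at h1; simp at h1
    rcases List.exists_mem_of_ne_nil _ hne with ⟨c, hm⟩
    rcases List.mem_filterMap.mp hm with ⟨p, hp, hsome⟩
    by_cases hcond : p.1 = k ∧ (PySem.Chars.isdigit p.2 ∨ p.2 = '+' ∨ p.2 = '*')
    · exact ⟨p, hp, hcond.1⟩
    · simp [hcond] at hsome

theorem pick_enum_lt (l : List Char) (s k : Int) (h : k < s) :
    pickRel k (PySem.List.enumerate l s) = [] := by
  induction l generalizing s with
  | nil => simp [pickRel]
  | cons c rest ih =>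
    rw [PySem.List.enumerate_cons]
    have hne : ¬s = k := by omega
    simp only [pickRel, List.filterMap_cons]
    rw [if_neg (by rintro ⟨h, -⟩; omega)]
    exact ih (s + 1) (by omega)

theorem pick_enum (l : List Char) (s : Int) (j : Nat) :
    pickRel (s + j) (PySem.List.enumerate l s) =
      (match l[j]? with
       | some c => if PySem.Chars.isdigit c ∨ c = '+' ∨ c = '*' then [c] else []
       | none => []) := by
  induction l generalizing s j with
  | nil => simp [pickRel]
  | cons c rest ih =>
    rw [PySem.List.enumerate_cons]
    cases j with
    | zero =>
      simp only [Nat.cast_zero, add_zero, pickRel, List.filterMap_cons]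
      have htail := pick_enum_lt rest (s + 1) s (by omega)
      simp only [pickRel] at htail
      by_cases hrel : PySem.Chars.isdigit c ∨ c = '+' ∨ c = '*'
      · rw [if_pos (by simp [hrel]), htail]
        simp [hrel]
      · rw [if_neg (by simp [hrel]), htail]
        simp [hrel]
    | succ j' =>
      simp only [pickRel, List.filterMap_cons]
      rw [if_neg (by rintro ⟨h, -⟩; push_cast at h; omega)]
      have hih := ih (s + 1) j'
      simp only [pickRel] at hih
      rw [show s + ((j' + 1 : Nat) : Int) = (s + 1) + (j' : Int) by push_cast; ring, hih]
      simp

theorem pick_flat (rows : List (List Char)) (n : Nat) (j : Nat) (hj : j < n) :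
    pickRel (j : Int) (rows.flatMap (fun row => PySem.List.enumerate (row.take n)))
      = colCells rows j := by
  induction rows with
  | nil => simp [pickRel, colCells]
  | cons r rest ih =>
    rw [List.flatMap_cons]
    simp only [pickRel, List.filterMap_append]
    have h1 := pick_enum (r.take n) 0 j
    simp only [zero_add, pickRel] at h1
    have h2 : (r.take n)[j]? = r[j]? := by
      rw [List.getElem?_take]
      simp [hj]
    rw [h1, h2]
    simp only [pickRel] at ih
    rw [ih]
    simp only [colCells, List.filterMap_cons]
    cases hc : r[j]? with
    | none => simp
    | some c =>
      by_cases hrel : PySem.Chars.isdigit c ∨ c = '+' ∨ c = '*' <;> simp [hrel]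

theorem agg_split (cs : List Char) (a : List Char) (b : List String) :
    cs.foldl extA (a, b) =
      (a ++ cs.filter (fun c => PySem.Chars.isdigit c),
       b ++ (cs.filter (fun c => !PySem.Chars.isdigit c)).map (fun c => String.ofList [c])) := by
  induction cs generalizing a b with
  | nil => simp
  | cons c rest ih =>
    rw [List.foldl_cons]
    by_cases hd : PySem.Chars.isdigit c
    · rw [show extA (a, b) c = (a ++ [c], b) by simp [extA, hd], ih]
      simp [hd]
    · rw [show extA (a, b) c = (a, b ++ [String.ofList [c]]) by simp [extA, hd], ih]
      simp [hd]

theorem colCells_digits (rows : List (List Char)) (j : Nat) :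
    (colCells rows j).filter (fun c => PySem.Chars.isdigit c) = bColDigits rows j := by
  induction rows with
  | nil => simp [colCells, bColDigits]
  | cons r rest ih =>
    simp only [colCells, bColDigits, List.filterMap_cons, PySem.List.pyGet?_natCast] at *
    cases hc : r[j]? with
    | none => simpa using ih
    | some c =>
      by_cases hd : PySem.Chars.isdigit c
      · simp [hd, ih]
      · by_cases hop : c = '+' ∨ c = '*' <;> simp [hd, hop, ih]

theorem colCells_ops (rows : List (List Char)) (j : Nat) :
    ((colCells rows j).filter (fun c => !PySem.Chars.isdigit c)).map (fun c => String.ofList [c])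
      = bColOps rows j := by
  induction rows with
  | nil => simp [colCells, bColOps]
  | cons r rest ih =>
    simp only [colCells, bColOps, List.filterMap_cons, PySem.List.pyGet?_natCast] at *
    cases hc : r[j]? with
    | none => simpa using ih
    | some c =>
      by_cases hd : PySem.Chars.isdigit c
      · have hop : ¬(c = '+' ∨ c = '*') := by
          rintro (rfl | rfl) <;> simp [PySem.Chars.isdigit] at hd
        simp [hd, hop, ih]
      · by_cases hop : c = '+' ∨ c = '*' <;> simp [hd, hop, ih]

-- B's first pass, flattened to the cell list, computes the column descriptors …
theorem dict_getD (rows : List (List Char)) (n j : Nat) (hj : j < n) :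
    ((rows.flatMap (fun row => PySem.List.enumerate (row.take n))).foldl bRowStep
        PySem.Dict.empty).getD (j : Int) ([], [])
      = (bColDigits rows j, bColOps rows j) := by
  rw [getD_fold, PySem.Dict.getD_empty, pick_flat rows n j hj, agg_split]
  simp [colCells_digits, colCells_ops]

-- … contains a column key iff the column has a relevant character …
theorem dict_contains (rows : List (List Char)) (n j : Nat) (hj : j < n) :
    ((rows.flatMap (fun row => PySem.List.enumerate (row.take n))).foldl bRowStep
        PySem.Dict.empty).contains (j : Int)
      = !(colCells rows j).isEmpty := by
  rw [contains_fold, PySem.Dict.contains_empty, pick_flat rows n j hj]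
  simp

-- … and its keys all denote columns below n.
theorem dict_keys_range (rows : List (List Char)) (n : Nat) (k : Int)
    (h : k ∈ ((rows.flatMap (fun row => PySem.List.enumerate (row.take n))).foldl bRowStep
        PySem.Dict.empty).keys) : ∃ j : Nat, j < n ∧ k = (j : Int) := by
  rcases mem_keys_fold _ _ _ h with h1 | ⟨p, hp, hpk⟩
  · simp [PySem.Dict.keys_empty] at h1
  · rcases List.mem_flatMap.mp hp with ⟨row, _, hmem⟩
    rcases (PySem.List.mem_enumerate_iff _ _ _).mp hmem with ⟨kk, hk, hpe⟩
    refine ⟨kk, ?_, by rw [← hpk, hpe]; simp⟩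
    have := List.length_take_le n row
    omega

theorem keys_sorted (n : Nat) (d : PySem.Dict Int (List Char × List String))
    (hnd : d.keys.Nodup) (hkr : ∀ k ∈ d.keys, ∃ j : Nat, j < n ∧ k = (j : Int)) :
    PySem.List.sorted d.keys (fun x => x) true
      = ((List.range n).reverse.map (fun (j : Nat) => (j : Int))).filter (fun k => d.contains k) := by
  apply PySem.List.sorted_rev_eq_of_perm_of_pairwise_gt
  · have hys : (((List.range n).reverse.map (fun (j : Nat) => (j : Int))).filter
        (fun k => d.contains k)).Nodup := by
      refine List.Nodup.filter _ (List.Nodup.map ?_ (List.nodup_reverse.mpr (List.nodup_range)))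
      exact fun a b hab => by exact_mod_cast hab
    rw [List.perm_ext_iff_of_nodup hys hnd]
    intro a
    constructor
    · intro ha
      exact (PySem.Dict.contains_iff_mem_keys _ _).mp (by simpa using (List.mem_filter.mp ha).2)
    · intro ha
      rcases hkr a ha with ⟨j, hj, rfl⟩
      refine List.mem_filter.mpr ⟨List.mem_map.mpr ⟨j, by simp [hj], rfl⟩, ?_⟩
      simpa using (PySem.Dict.contains_iff_mem_keys _ _).mpr ha
  · refine List.Pairwise.filter _ ?_
    rw [List.pairwise_map]
    rw [List.pairwise_reverse]
    exact List.pairwise_lt_range.imp (fun h => by exact_mod_cast h)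

theorem group_fold (rows : List (List Char)) (n : Nat)
    (d : PySem.Dict Int (List Char × List String))
    (hget : ∀ j : Nat, j < n → d.getD (j : Int) ([], []) = (bColDigits rows j, bColOps rows j))
    (hcont : ∀ j : Nat, j < n → d.contains (j : Int) = !(colCells rows j).isEmpty)
    (init : List (List Int) × List String × List Int) :
    (((List.range n).reverse.map (fun (j : Nat) => (j : Int))).filter
        (fun k => d.contains k)).foldl (bGroupStep d) init
      = (List.range n).reverse.foldl (gStep rows) init := by
  rw [show ((List.range n).reverse.map (fun (j : Nat) => (j : Int))).filter (fun k => d.contains k)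
        = ((List.range n).reverse.map (fun (j : Nat) => (j : Int))).filter
            (fun k => decide (d.contains k = true)) by simp]
  rw [← PySem.List.foldl_ite_eq_foldl_filter (fun k => d.contains k = true)
        (bGroupStep d) ((List.range n).reverse.map (fun (j : Nat) => (j : Int))) init]
  rw [List.foldl_map]
  apply PySem.List.foldl_congr_mem
  intro st j hj
  have hjn : j < n := List.mem_range.mp (List.mem_reverse.mp hj)
  by_cases hc : d.contains (j : Int) = true
  · rw [if_pos hc]
    unfold bGroupStep gStep
    rw [hget j hjn]
  · rw [if_neg hc]
    have hcells : (colCells rows j).isEmpty = true := by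
      have := hcont j hjn
      rw [this] at hc
      simpa using hc
    have hcells' : colCells rows j = [] := List.isEmpty_iff.mp hcells
    have hdg : bColDigits rows j = [] := by rw [← colCells_digits, hcells']; rfl
    have hop : bColOps rows j = [] := by rw [← colCells_ops, hcells']; rfl
    unfold gStep
    rw [hdg, hop]
    simp

-- ===== VERDICT (by name: the statement is the Claim_ definition above) =====
theorem parse_right_to_left_spec : Claim_equal_parse_right_to_left := by
  intro ws _ _
  unfold Spec_parse_right_to_left parse_right_to_left parse_right_to_left_alt
  simp only [PySem.List.slice_to_natCast]
  set n := (ws.headD "").toList.length with hn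
  set rows := ws.map String.toList with hrows
  rw [show ws.foldl (fun d row => (PySem.List.enumerate (row.toList.take n)).foldl bRowStep d)
        PySem.Dict.empty
      = rows.foldl (fun d row => (PySem.List.enumerate (row.take n)).foldl bRowStep d)
        PySem.Dict.empty by rw [hrows, List.foldl_map]]
  rw [flat_fold]
  set d := (rows.flatMap (fun row => PySem.List.enumerate (row.take n))).foldl bRowStep
    PySem.Dict.empty with hd
  rw [keys_sorted n d (nodup_fold _ _ (by simp [PySem.Dict.keys_empty]))
        (fun k hk => dict_keys_range rows n k hk)]
  rw [group_fold rows n d (fun j hj => dict_getD rows n j hj) (fun j hj => dict_contains rows n j hj)]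
  rw [outer_eq]
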